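-- pv_equiv track=rewrite | github.com/oigomezz/Retos | Hackerearth/Basics of Implementation/Update the Array/solution.py | min_updates
-- ===== SOURCE A (Python) =====
-- def min_updates(n, arr, k):
--     if n % 2 != 0:
--         return -1
--
--     odd = [x for x in arr if x % 2 != 0]
--     set_odd = set(odd)
--     size_odd = len(set_odd)
--
--     even = [x for x in arr if x % 2 == 0]
--     set_even = set(even)
--     size_even = len(set_even)
--
--     odd_k = [x for x in range(1, k+1, 1) if x % 2 != 0 and x not in odd]
--     even_k = [x for x in range(1, k+1, 1) if x % 2 == 0 and x not in even]
--     count = 0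
--
--     if size_odd > size_even and (size_odd - size_even) <= len(even_k):
--         count += size_odd - size_even
--     elif size_odd < size_even and (size_even - size_odd) <= len(odd_k):
--         count += size_even - size_odd
--     else:
--         count = -1
--     return count
-- ===== SOURCE B (Python) =====
-- def min_updates(n, arr, k):
--     if n % 2 != 0:
--         return -1
--
--     set_odd = {x for x in arr if x % 2 != 0}
--     set_even = {x for x in arr if x % 2 == 0}
--     size_odd = len(set_odd)
--     size_even = len(set_even)
--
--     # availability in [1, k] by arithmetic instead of a scan over range(1, k+1)
--     if k >= 1:
--         avail_odd = (k + 1) // 2 - sum(1 for x in set_odd if 1 <= x <= k)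
--         avail_even = k // 2 - sum(1 for x in set_even if 1 <= x <= k)
--     else:
--         avail_odd = avail_even = 0
--
--     if size_odd > size_even and size_odd - size_even <= avail_even:
--         return size_odd - size_even
--     if size_odd < size_even and size_even - size_odd <= avail_odd:
--         return size_even - size_odd
--     return -1
-- ===== Notes on version B (the rewrite author's own statement) =====
-- stated objective: alternative
-- what changed: Replaced the two scans over range(1, k+1) with arithmetic: odds/evens available in [1,k] are (k+1)//2 and k//2 minus the distinct array values of that parity falling in [1,k], counted over the small sets; cost no longer depends on k.
import Mathlib
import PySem

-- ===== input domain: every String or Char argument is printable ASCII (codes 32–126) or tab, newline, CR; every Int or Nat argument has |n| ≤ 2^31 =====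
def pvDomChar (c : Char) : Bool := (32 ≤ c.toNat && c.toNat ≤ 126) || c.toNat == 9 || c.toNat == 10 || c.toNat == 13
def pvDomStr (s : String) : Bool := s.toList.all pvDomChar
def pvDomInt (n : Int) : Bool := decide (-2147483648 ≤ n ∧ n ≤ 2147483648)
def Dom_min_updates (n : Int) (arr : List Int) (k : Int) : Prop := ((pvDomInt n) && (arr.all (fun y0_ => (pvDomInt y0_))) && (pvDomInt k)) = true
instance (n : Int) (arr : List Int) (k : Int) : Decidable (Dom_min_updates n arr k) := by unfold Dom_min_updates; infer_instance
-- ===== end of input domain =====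

-- B replaces A's two scans over range(1, k+1) by arithmetic: (k+1)//2 resp. k//2 minus the distinct in-range array values of each parity (an alternative, k-independent computation of the same availability counts).


-- ===== PORT A =====
def min_updates (n : Int) (arr : List Int) (k : Int) : Int :=
  if PySem.Int.mod n 2 ≠ 0 then -1
  else
    let odd := arr.filter (fun x => !(PySem.Int.mod x 2 == 0))
    let set_odd := PySem.Set.ofList odd
    let size_odd : Int := set_odd.length
    let even := arr.filter (fun x => PySem.Int.mod x 2 == 0)
    let set_even := PySem.Set.ofList even
    let size_even : Int := set_even.length
    let odd_k := (PySem.List.pyRange 1 (k+1) 1).filter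
      (fun x => !(PySem.Int.mod x 2 == 0) && !(odd.contains x))
    let even_k := (PySem.List.pyRange 1 (k+1) 1).filter
      (fun x => (PySem.Int.mod x 2 == 0) && !(even.contains x))
    if size_odd > size_even ∧ size_odd - size_even ≤ (even_k.length : Int) then
      0 + (size_odd - size_even)
    else if size_odd < size_even ∧ size_even - size_odd ≤ (odd_k.length : Int) then
      0 + (size_even - size_odd)
    else -1

-- ===== PORT B =====
def min_updates_alt (n : Int) (arr : List Int) (k : Int) : Int :=
  if PySem.Int.mod n 2 ≠ 0 then -1
  else
    let set_odd := PySem.Set.ofList (arr.filter (fun x => !(PySem.Int.mod x 2 == 0)))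
    let set_even := PySem.Set.ofList (arr.filter (fun x => PySem.Int.mod x 2 == 0))
    let size_odd : Int := set_odd.length
    let size_even : Int := set_even.length
    let avail_odd : Int :=
      if 1 ≤ k then
        PySem.Int.floordiv (k+1) 2 -
          (set_odd.countP (fun x => decide (1 ≤ x) && decide (x ≤ k)) : Int)
      else 0
    let avail_even : Int :=
      if 1 ≤ k then
        PySem.Int.floordiv k 2 -
          (set_even.countP (fun x => decide (1 ≤ x) && decide (x ≤ k)) : Int)
      else 0
    if size_odd > size_even ∧ size_odd - size_even ≤ avail_even then size_odd - size_even
    else if size_odd < size_even ∧ size_even - size_odd ≤ avail_odd then size_even - size_odd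
    else -1

-- ===== PRECONDITION & SPEC =====
def Spec_min_updates (n : Int) (arr : List Int) (k : Int) (out : Int) : Prop := out = min_updates_alt n arr k
instance (n : Int) (arr : List Int) (k : Int) (out : Int) : Decidable (Spec_min_updates n arr k out) := by unfold Spec_min_updates; infer_instance

-- ===== CLAIM (what is proved, stated in full; the proofs are below) =====
def Claim_equal_min_updates : Prop := ∀ (n : Int) (arr : List Int) (k : Int), Dom_min_updates n arr k → Spec_min_updates n arr k (min_updates n arr k)

-- ===== LEMMAS AND PROOFS =====

-- split a conjunction count: countP (q ∧ ¬c) = countP q - countP (q ∧ c)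
lemma countP_and_not_eq (q c : Int → Bool) (R : List Int) :
    R.countP (fun x => q x && !(c x))
      = R.countP q - R.countP (fun x => q x && c x) := by
  induction R with
  | nil => simp
  | cons a R ih =>
    have hle : R.countP (fun x => q x && c x) ≤ R.countP q := by
      apply List.countP_mono_left; intro x _ h; exact (Bool.and_elim_left h)
    simp only [List.countP_cons]
    cases hq : q a <;> cases hc : c a <;> simp [ih] <;> omega

-- counting the intersection from either side (both lists without duplicates)
lemma countP_inter_swap (p : Int → Bool) (A B : List Int) (hA : A.Nodup) (hB : B.Nodup) :
    A.countP (fun x => p x && B.contains x) = B.countP (fun x => p x && A.contains x) := by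
  rw [List.countP_eq_length_filter, List.countP_eq_length_filter]
  rw [← List.toFinset_card_of_nodup (hA.filter _), ← List.toFinset_card_of_nodup (hB.filter _)]
  congr 1
  ext x
  simp
  tauto

lemma countOddNat (m : Nat) :
    ((List.range m).map (fun i : Nat => (1:Int) + (i:Int))).countP
      (fun x => !(PySem.Int.mod x 2 == 0)) = (m+1)/2 := by
  induction m with
  | zero => simp
  | succ m ih =>
    rw [List.range_succ, List.map_append, List.countP_append, ih]
    have hmod : PySem.Int.mod ((1:Int) + m) 2 = (((1+m) % 2 : Nat) : Int) := by
      have h1 : ((1:Int) + m) = (((1+m : Nat) : Int)) := by push_cast; ring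
      rw [h1]
      exact_mod_cast PySem.Int.mod_natCast (1+m) 2
    simp only [List.map_cons, List.map_nil, List.countP_cons, List.countP_nil, hmod]
    rcases Nat.even_or_odd (1+m) with h | h
    · have h2 : (1+m) % 2 = 0 := Nat.even_iff.mp h
      simp [h2]; omega
    · have h2 : (1+m) % 2 = 1 := Nat.odd_iff.mp h
      simp [h2]; omega

lemma countEvenNat (m : Nat) :
    ((List.range m).map (fun i : Nat => (1:Int) + (i:Int))).countP
      (fun x => PySem.Int.mod x 2 == 0) = m/2 := by
  induction m with
  | zero => simp
  | succ m ih =>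
    rw [List.range_succ, List.map_append, List.countP_append, ih]
    have hmod : PySem.Int.mod ((1:Int) + m) 2 = (((1+m) % 2 : Nat) : Int) := by
      have h1 : ((1:Int) + m) = (((1+m : Nat) : Int)) := by push_cast; ring
      rw [h1]
      exact_mod_cast PySem.Int.mod_natCast (1+m) 2
    simp only [List.map_cons, List.map_nil, List.countP_cons, List.countP_nil, hmod]
    rcases Nat.even_or_odd (1+m) with h | h
    · have h2 : (1+m) % 2 = 0 := Nat.even_iff.mp h
      simp [h2]; omega
    · have h2 : (1+m) % 2 = 1 := Nat.odd_iff.mp h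
      simp [h2]; omega

lemma range_eq (k : Int) :
    PySem.List.pyRange 1 (k+1) 1 = (List.range k.toNat).map (fun i : Nat => (1:Int) + (i:Int)) := by
  rw [PySem.List.pyRange_one]
  have h : (k + 1 - 1).toNat = k.toNat := by omega
  rw [h]

-- the list availability count of A equals B's arithmetic form
lemma avail_eq (q : Int → Bool) (L : List Int) (hq : ∀ x ∈ L, q x = true) (k : Int) :
    ((((PySem.List.pyRange 1 (k+1) 1).filter (fun x => q x && !(L.contains x))).length : Int))
      = (((PySem.List.pyRange 1 (k+1) 1).countP q : Nat) : Int) -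
        ((PySem.Set.ofList L).countP (fun x => decide (1 ≤ x) && decide (x ≤ k)) : Int) := by
  set R := PySem.List.pyRange 1 (k+1) 1 with hR
  have hcontains : R.countP (fun x => q x && L.contains x)
      = R.countP (fun x => q x && (PySem.Set.ofList L).contains x) := by
    apply List.countP_congr
    intro x _
    have h2 : (L.contains x = true) ↔ ((PySem.Set.ofList L).contains x = true) := by
      simp [PySem.Set.mem_ofList]
    cases hq' : q x <;> simp_all
  have hswap : R.countP (fun x => q x && (PySem.Set.ofList L).contains x)
      = (PySem.Set.ofList L).countP (fun x => q x && R.contains x) :=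
    countP_inter_swap q R (PySem.Set.ofList L)
      (hR ▸ PySem.List.nodup_pyRange_one 1 (k+1)) (PySem.Set.nodup_ofList L)
  have hset : (PySem.Set.ofList L).countP (fun x => q x && R.contains x)
      = (PySem.Set.ofList L).countP (fun x => decide (1 ≤ x) && decide (x ≤ k)) := by
    apply List.countP_congr
    intro x hx
    have hxL : x ∈ L := (PySem.Set.mem_ofList L x).mp hx
    have hqx : q x = true := hq x hxL
    have hmem : (R.contains x = true) ↔ (1 ≤ x ∧ x < k + 1) := by
      rw [List.contains_iff_mem, hR, PySem.List.mem_pyRange_one]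
    simp only [Bool.and_eq_true, decide_eq_true_eq, hqx, true_and, hmem]
    omega
  have hle : R.countP (fun x => q x && L.contains x) ≤ R.countP q := by
    apply List.countP_mono_left; intro x _ h; exact (Bool.and_elim_left h)
  have hsplit := countP_and_not_eq q (fun x => L.contains x) R
  have hle2 : (PySem.Set.ofList L).countP (fun x => decide (1 ≤ x) && decide (x ≤ k))
      ≤ R.countP q := by rw [← hset, ← hswap, ← hcontains]; exact hle
  rw [hcontains, hswap, hset] at hsplit
  rw [← List.countP_eq_length_filter, hsplit]
  omega

-- ===== VERDICT (by name: the statement is the Claim_ definition above) =====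
theorem min_updates_spec : Claim_equal_min_updates := by
  unfold Claim_equal_min_updates Spec_min_updates
  intro n arr k _
  unfold min_updates min_updates_alt
  by_cases hn : PySem.Int.mod n 2 ≠ 0
  · rw [if_pos hn, if_pos hn]
  · rw [if_neg hn, if_neg hn]
    dsimp only
    by_cases hk : 1 ≤ k
    · -- rewrite A's list lengths into B's arithmetic
      have hko : ((PySem.List.pyRange 1 (k+1) 1).countP (fun x => !(PySem.Int.mod x 2 == 0)) : Int)
          = PySem.Int.floordiv (k+1) 2 := by
        rw [range_eq, countOddNat]
        have h1 : k + 1 = ((k.toNat + 1 : Nat) : Int) := by omega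
        rw [h1]
        exact_mod_cast (PySem.Int.floordiv_natCast (k.toNat + 1) 2).symm
      have hke : ((PySem.List.pyRange 1 (k+1) 1).countP (fun x => PySem.Int.mod x 2 == 0) : Int)
          = PySem.Int.floordiv k 2 := by
        rw [range_eq, countEvenNat]
        have h1 : k = ((k.toNat : Nat) : Int) := by omega
        rw [h1]
        exact_mod_cast (PySem.Int.floordiv_natCast k.toNat 2).symm
      have hodd := avail_eq (fun x => !(PySem.Int.mod x 2 == 0))
        (arr.filter (fun x => !(PySem.Int.mod x 2 == 0)))
        (by intro x hx; exact (List.mem_filter.mp hx).2) k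
      have heven := avail_eq (fun x => PySem.Int.mod x 2 == 0)
        (arr.filter (fun x => PySem.Int.mod x 2 == 0))
        (by intro x hx; exact (List.mem_filter.mp hx).2) k
      rw [hko] at hodd
      rw [hke] at heven
      rw [hodd, heven, if_pos hk, if_pos hk]
      split_ifs <;> omega
    · have hnil : PySem.List.pyRange 1 (k+1) 1 = [] :=
        PySem.List.pyRange_one_eq_nil (by omega)
      rw [hnil, if_neg hk, if_neg hk]
      simp only [List.filter_nil, List.length_nil, Nat.cast_zero]
      split_ifs <;> omega
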